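-- pv_equiv track=rewrite | github.com/flobatard/ingestion_admin_osm_data | cleanDataOutOfParents.py | get_the_remaining_from_osm
-- ===== SOURCE A (Python) =====
-- def get_the_remaining_from_osm(l):
--     to_keep = None
--     for i in l:
--         if i != None:
--             if to_keep != None and to_keep != i:
--                 raise Exception({"message": "Different parent for same admin id", "value": l})
--             to_keep = i
--     return to_keep
-- ===== SOURCE B (Python) =====
-- def get_the_remaining_from_osm(l):
--     # Divide and conquer: recursively reduce each half to its unique non-None
--     # value (or None), then merge the two representatives; merge raises on a
--     # conflict, exactly as A does.
--     def merge(a, b):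
--         if a is None:
--             return b
--         if b is None:
--             return a
--         if a != b:
--             raise Exception({"message": "Different parent for same admin id", "value": l})
--         return a
--
--     def solve(lo, hi):
--         if hi - lo == 0:
--             return None
--         if hi - lo == 1:
--             return l[lo]
--         mid = (lo + hi) // 2
--         return merge(solve(lo, mid), solve(mid, hi))
--
--     return solve(0, len(l))
-- ===== Notes on version B (the rewrite author's own statement) =====
-- stated objective: alternative
-- what changed: Replaces A's left-to-right accumulator scan with a divide-and-conquer recursion: each half is reduced to its unique non-None representative and the two representatives are merged (raising on conflict).
import Mathlib
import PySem

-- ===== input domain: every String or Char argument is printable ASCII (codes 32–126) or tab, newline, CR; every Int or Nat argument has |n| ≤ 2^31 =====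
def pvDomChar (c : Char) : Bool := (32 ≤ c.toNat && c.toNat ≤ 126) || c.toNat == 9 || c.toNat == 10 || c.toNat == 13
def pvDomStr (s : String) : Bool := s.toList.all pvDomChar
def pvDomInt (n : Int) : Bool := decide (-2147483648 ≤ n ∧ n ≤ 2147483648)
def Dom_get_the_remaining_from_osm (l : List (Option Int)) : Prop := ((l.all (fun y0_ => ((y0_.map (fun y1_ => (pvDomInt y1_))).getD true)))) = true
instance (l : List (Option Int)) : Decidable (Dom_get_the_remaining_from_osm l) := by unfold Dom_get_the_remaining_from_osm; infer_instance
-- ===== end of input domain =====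

-- B replaces A's left-to-right accumulator scan with a divide-and-conquer recursion
-- (reduce each half to its representative, merge the two); equivalence of the return
-- value on conflict-free inputs (on conflicts both Pythons raise; excluded by Pre_).

-- ===== PORT A =====
-- loop over l with accumulator to_keep; the raise branch is outside Pre_ (we return
-- to_keep there, a value the claim never constrains).
def goA_get_the_remaining_from_osm (to_keep : Option Int) : List (Option Int) → Option Int
  | [] => to_keep
  | i :: rest =>
    if i ≠ none then
      if to_keep ≠ none ∧ to_keep ≠ i then to_keep  -- raise point (excluded by Pre_)
      else goA_get_the_remaining_from_osm i rest
    else goA_get_the_remaining_from_osm to_keep rest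

def get_the_remaining_from_osm (l : List (Option Int)) : Option Int :=
  goA_get_the_remaining_from_osm none l

-- ===== PORT B =====
-- merge of the two halves' representatives; at the raise point the value is
-- unconstrained (excluded by Pre_), we return a.
def mergeB (a b : Option Int) : Option Int :=
  match a with
  | none => b
  | some x =>
    match b with
    | none => a
    | some y => if x ≠ y then a  -- raise point (excluded by Pre_)
                else a

-- fuel is only a structural totality guard: every call has hi - lo ≤ fuel, and the
-- recursion depth strictly shrinks the range, so the fuel-0 branch is never reached.
def solveB (l : List (Option Int)) : Nat → Nat → Nat → Option Int
  | 0, _, _ => none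
  | fuel + 1, lo, hi =>
    if hi - lo = 0 then none
    else if hi - lo = 1 then
      (PySem.List.pyGet? l (lo : Int)).getD none  -- lo < l.length at every call site, so pyGet? = some
    else
      mergeB (solveB l fuel lo ((lo + hi) / 2)) (solveB l fuel ((lo + hi) / 2) hi)

def get_the_remaining_from_osm_alt (l : List (Option Int)) : Option Int :=
  solveB l l.length 0 l.length

-- ===== PRECONDITION & SPEC =====
-- Pre_ excludes exactly the inputs with two distinct non-None values, on which both A and B raise.
def Pre_get_the_remaining_from_osm (l : List (Option Int)) : Prop :=
  ∀ x ∈ l, ∀ y ∈ l, x ≠ none → y ≠ none → x = y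
instance (l : List (Option Int)) : Decidable (Pre_get_the_remaining_from_osm l) := by
  unfold Pre_get_the_remaining_from_osm; infer_instance

def pvWitness_get_the_remaining_from_osm : List (Option Int) := [none, some 7, some 7]

def Spec_get_the_remaining_from_osm (l : List (Option Int)) (out : Option Int) : Prop := out = get_the_remaining_from_osm_alt l
instance (l : List (Option Int)) (out : Option Int) : Decidable (Spec_get_the_remaining_from_osm l out) := by unfold Spec_get_the_remaining_from_osm; infer_instance

-- ===== CLAIM (what is proved, stated in full; the proofs are below) =====
def Claim_equal_get_the_remaining_from_osm : Prop := ∀ (l : List (Option Int)), Dom_get_the_remaining_from_osm l → Pre_get_the_remaining_from_osm l → Spec_get_the_remaining_from_osm l (get_the_remaining_from_osm l)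

-- ===== LEMMAS AND PROOFS =====

-- mergeB returns its first argument unless that is none.
theorem mergeB_eq_or (a b : Option Int) : mergeB a b = a.or b := by
  cases a with
  | none => rfl
  | some x => cases b with
    | none => rfl
    | some y => simp [mergeB]

-- B's recursion computes the first non-None element of the index range [lo, hi).
theorem solveB_spec (l : List (Option Int)) :
    ∀ fuel lo hi, hi - lo ≤ fuel → lo ≤ hi → hi ≤ l.length →
      solveB l fuel lo hi = ((l.drop lo).take (hi - lo)).findSome? id := by
  intro fuel
  induction fuel with
  | zero =>
    intro lo hi hn hle hlen
    have h0 : hi - lo = 0 := by omega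
    simp [solveB, h0]
  | succ fuel ih =>
    intro lo hi hn hle hlen
    rw [solveB]
    by_cases h0 : hi - lo = 0
    · simp [h0]
    · by_cases h1 : hi - lo = 1
      · have hlt : lo < l.length := by omega
        have : (PySem.List.pyGet? l (lo : Int)) = some l[lo] := by
          simp [PySem.List.pyGet?, PySem.List.pyIdx?, hlt]
        rw [if_neg h0, if_pos h1, this, h1]
        have hdrop : (l.drop lo).take 1 = [l[lo]] := by
          rw [List.take_one]
          simp [List.head?_drop, List.getElem?_eq_getElem hlt]
        rw [hdrop]
        cases hx : l[lo] <;> simp [List.findSome?]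
      · rw [if_neg h0, if_neg h1]
        have hmidl : lo < (lo + hi) / 2 := by omega
        have hmidr : (lo + hi) / 2 < hi := by omega
        rw [ih lo ((lo + hi) / 2) (by omega) (by omega) (by omega),
            ih ((lo + hi) / 2) hi (by omega) (by omega) hlen,
            mergeB_eq_or]
        have hsplit : (l.drop lo).take (hi - lo)
            = (l.drop lo).take ((lo + hi) / 2 - lo)
              ++ (l.drop ((lo + hi) / 2)).take (hi - (lo + hi) / 2) := by
          have h2 : hi - lo = ((lo + hi) / 2 - lo) + (hi - (lo + hi) / 2) := by omega
          have e2 : lo + ((lo + hi) / 2 - lo) = (lo + hi) / 2 := by omega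
          rw [h2, List.take_add, List.drop_drop]
          rw [e2]
        rw [hsplit, List.findSome?_append]

-- A's loop, started from an accumulator consistent with l, returns the accumulator if
-- no non-None element remains, else the first (= every) non-None element.
theorem goA_spec (l : List (Option Int)) (tk : Option Int)
    (hpre : Pre_get_the_remaining_from_osm l)
    (htk : ∀ x ∈ l, x ≠ none → tk = none ∨ tk = x) :
    goA_get_the_remaining_from_osm tk l =
      match l.filter (fun i => i ≠ none) with
      | [] => tk
      | v :: _ => v := by
  induction l generalizing tk with
  | nil => simp [goA_get_the_remaining_from_osm]
  | cons i rest ih =>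
    have hpre' : Pre_get_the_remaining_from_osm rest := fun x hx y hy =>
      hpre x (List.mem_cons_of_mem _ hx) y (List.mem_cons_of_mem _ hy)
    by_cases hi : i = none
    · subst hi
      have h1 : goA_get_the_remaining_from_osm tk (none :: rest)
          = goA_get_the_remaining_from_osm tk rest := by
        simp [goA_get_the_remaining_from_osm]
      have h2 : (none :: rest).filter (fun i => i ≠ none) = rest.filter (fun i => i ≠ none) := by
        simp
      rw [h1, h2]
      exact ih tk hpre' (fun x hx => htk x (List.mem_cons_of_mem _ hx))
    · have hbr : ¬ (tk ≠ none ∧ tk ≠ i) := by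
        rcases htk i List.mem_cons_self hi with h | h
        · intro hc; exact hc.1 h
        · intro hc; exact hc.2 h
      have h1 : goA_get_the_remaining_from_osm tk (i :: rest)
          = goA_get_the_remaining_from_osm i rest := by
        simp only [goA_get_the_remaining_from_osm, ne_eq, hi, not_false_eq_true, if_true,
          if_neg hbr]
      have h2 : (i :: rest).filter (fun j => j ≠ none) = i :: rest.filter (fun j => j ≠ none) := by
        simp [hi]
      rw [h1, h2]
      rw [ih i hpre' (fun x hx hxn =>
        Or.inr (hpre i List.mem_cons_self x (List.mem_cons_of_mem _ hx) hi hxn))]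
      cases hf : rest.filter (fun j => j ≠ none) with
      | nil => rfl
      | cons w ws =>
        have hw : w ∈ rest.filter (fun j => j ≠ none) := by rw [hf]; exact List.mem_cons_self
        rw [List.mem_filter] at hw
        have : i = w := hpre i List.mem_cons_self w (List.mem_cons_of_mem _ hw.1) hi
          (by simpa using hw.2)
        simp [this]

-- First matching element of the filter is the first some, i.e. findSome? id.
theorem filter_head_eq_findSome (l : List (Option Int)) :
    (match l.filter (fun i => i ≠ none) with
      | [] => (none : Option Int)
      | v :: _ => v) = l.findSome? id := by
  induction l with
  | nil => rfl
  | cons i rest ih =>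
    cases i with
    | none => simpa [List.findSome?] using ih
    | some v => simp [List.findSome?]

-- ===== VERDICT (by name: the statement is the Claim_ definition above) =====
theorem get_the_remaining_from_osm_spec : Claim_equal_get_the_remaining_from_osm := by
  intro l _ hpre
  unfold Spec_get_the_remaining_from_osm get_the_remaining_from_osm get_the_remaining_from_osm_alt
  rw [goA_spec l none hpre (fun x _ _ => Or.inl rfl),
      solveB_spec l l.length 0 l.length (by omega) (Nat.zero_le _) le_rfl]
  simpa using filter_head_eq_findSome l
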